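-- pv_equiv track=rewrite | github.com/davidbalann/KingHacks | backend/app/import_any_json.py | norm_for_key
-- ===== SOURCE A (Python) =====
-- def norm_for_key(text: str) -> str:
--     """Simple normalizer used for source_key construction."""
--     if not text:
--         return ""
--     keep = []
--     for ch in text.lower():
--         if ch.isalnum() or ch.isspace():
--             keep.append(ch)
--     return " ".join("".join(keep).split())
-- ===== SOURCE B (Python) =====
-- def norm_for_key(text: str) -> str:
--     """Simple normalizer used for source_key construction."""
--     res = []
--     pending = False
--     for ch in text.lower():
--         if ch.isalnum():
--             if pending:
--                 res.append(' ')
--                 pending = False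
--             res.append(ch)
--         elif ch.isspace():
--             if res:
--                 pending = True
--     return ''.join(res)
-- ===== Notes on version B (the rewrite author's own statement) =====
-- stated objective: alternative
-- what changed: B replaces A's filter-then-split-then-join pipeline by a single-pass state machine over the lowercased characters that emits kept characters directly, using a pending-separator flag to insert exactly one space between words; no intermediate filtered string or token list is built.
import Mathlib
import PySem

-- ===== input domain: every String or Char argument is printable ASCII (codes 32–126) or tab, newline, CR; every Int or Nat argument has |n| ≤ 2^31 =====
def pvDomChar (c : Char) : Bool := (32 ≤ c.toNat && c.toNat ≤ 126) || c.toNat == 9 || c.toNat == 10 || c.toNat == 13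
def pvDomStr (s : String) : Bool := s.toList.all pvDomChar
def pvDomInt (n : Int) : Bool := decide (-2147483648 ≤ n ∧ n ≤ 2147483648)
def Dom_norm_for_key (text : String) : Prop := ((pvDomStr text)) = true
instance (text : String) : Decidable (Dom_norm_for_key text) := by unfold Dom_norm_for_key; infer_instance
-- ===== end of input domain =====

-- B replaces A's filter-then-split-then-join pipeline by a single-pass state machine with a
-- pending-separator flag; same asymptotic cost, no intermediate token list.

-- ===== PORT A =====
-- filter every character of the lowercased text, then split and rejoin
def norm_for_key (text : String) : String :=
  if text = "" then ""
  else
    let keep : List Char :=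
      (PySem.Chars.lower text.toList).foldl
        (fun keep ch =>
          if PySem.Chars.isalnum ch || PySem.Chars.isspace ch then keep ++ [ch] else keep) []
    String.ofList (PySem.Chars.join [' '] (PySem.Chars.split₀ keep))

-- ===== PORT B =====
-- one pass: emit alphanumeric chars, a pending flag inserts one space between words
def normStep (st : List Char × Bool) (ch : Char) : List Char × Bool :=
  if PySem.Chars.isalnum ch then
    ((if st.2 then st.1 ++ [' '] else st.1) ++ [ch], false)
  else if PySem.Chars.isspace ch then
    (st.1, if !st.1.isEmpty then true else st.2)
  else st

def norm_for_key_alt (text : String) : String :=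
  String.ofList ((PySem.Chars.lower text.toList).foldl normStep ([], false)).1

-- ===== PRECONDITION & SPEC =====
def Spec_norm_for_key (text : String) (out : String) : Prop := out = norm_for_key_alt text
instance (text : String) (out : String) : Decidable (Spec_norm_for_key text out) := by unfold Spec_norm_for_key; infer_instance

-- ===== CLAIM (what is proved, stated in full; the proofs are below) =====
def Claim_equal_norm_for_key : Prop := ∀ (text : String), Dom_norm_for_key text → Spec_norm_for_key text (norm_for_key text)

-- ===== LEMMAS AND PROOFS =====

theorem alnum_not_space (c : Char) (h : PySem.Chars.isalnum c = true) :
    PySem.Chars.isspace c = false := by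
  simp only [PySem.Chars.isalnum, PySem.Chars.isalpha, PySem.Chars.isdigit,
    PySem.Chars.isupper, PySem.Chars.islower, Bool.or_eq_true, Bool.and_eq_true,
    decide_eq_true_eq, Char.le_def, UInt32.le_iff_toNat_le,
    show 'A'.val.toNat = 65 from rfl, show 'Z'.val.toNat = 90 from rfl,
    show 'a'.val.toNat = 97 from rfl, show 'z'.val.toNat = 122 from rfl,
    show '0'.val.toNat = 48 from rfl, show '9'.val.toNat = 57 from rfl] at h
  simp only [PySem.Chars.isspace, Bool.or_eq_false_iff, Bool.and_eq_false_iff,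
    decide_eq_false_iff_not, Char.toNat]
  omega

-- " ".join with one word appended at the end
theorem join_snoc (xs : List (List Char)) (w : List Char) :
    PySem.Chars.join [' '] (xs ++ [w])
      = if xs = [] then w else PySem.Chars.join [' '] xs ++ ' ' :: w := by
  induction xs with
  | nil => simp [PySem.Chars.join, List.intercalate]
  | cons a t ih =>
    cases t with
    | nil => simp [PySem.Chars.join, List.intercalate, List.intersperse]
    | cons b t' =>
      simp only [List.cons_append, PySem.Chars.join, List.intercalate, List.intersperse,
        List.flatten] at ih ⊢
      simp_all

def J (acc : List (List Char)) : List Char := PySem.Chars.join [' '] acc.reverse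

theorem J_cons (w : List Char) (acc : List (List Char)) :
    J (w :: acc) = if acc = [] then w else J acc ++ ' ' :: w := by
  have := join_snoc acc.reverse w
  simp only [J, List.reverse_cons]
  rw [this]
  simp

-- invariant linking the machine state to split₀.go's (cur, acc) state
def MInv (cur : List Char) (acc : List (List Char)) (res : List Char) (p : Bool) : Prop :=
  (cur = [] ∧ p = false ∧ acc = [] ∧ res = [])
  ∨ (cur = [] ∧ p = true ∧ res = J acc ∧ res ≠ [])
  ∨ (cur ≠ [] ∧ p = false ∧ res = J (cur.reverse :: acc))

theorem J_word_ne_nil (cur : List Char) (acc : List (List Char)) (h : cur ≠ []) :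
    J (cur.reverse :: acc) ≠ [] := by
  rw [J_cons]
  split_ifs
  · simpa using h
  · intro hc
    have : (' ' :: cur.reverse) ≠ ([] : List Char) := by simp
    simp [List.append_eq_nil_iff] at hc

theorem machine_go (ds : List Char) :
    ∀ cur acc res p, MInv cur acc res p →
      (ds.foldl normStep (res, p)).1
        = PySem.Chars.join [' ']
            (PySem.Chars.split₀.go
              (ds.filter (fun c => PySem.Chars.isalnum c || PySem.Chars.isspace c)) cur acc) := by
  induction ds with
  | nil =>
    intro cur acc res p hinv
    simp only [List.foldl_nil, List.filter_nil, PySem.Chars.split₀.go]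
    rcases hinv with ⟨h1, _, h3, h4⟩ | ⟨h1, _, h3, _⟩ | ⟨h1, _, h3⟩
    · simp [h1, h3, h4, PySem.Chars.join, List.intercalate]
    · have : cur.isEmpty = true := by simp [h1]
      simp [this, h3, J]
    · have : cur.isEmpty = false := by simpa [List.isEmpty_iff] using h1
      simp [this, h3, J]
  | cons c rest ih =>
    intro cur acc res p hinv
    by_cases ha : PySem.Chars.isalnum c = true
    · -- alnum: machine emits (maybe with a separator), go extends cur
      have hs := alnum_not_space c ha
      have hfil : (c :: rest).filter (fun c => PySem.Chars.isalnum c || PySem.Chars.isspace c)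
          = c :: rest.filter (fun c => PySem.Chars.isalnum c || PySem.Chars.isspace c) := by
        simp [ha]
      rw [hfil]
      simp only [List.foldl_cons, normStep, ha, if_true]
      rw [show PySem.Chars.split₀.go
            (c :: rest.filter (fun c => PySem.Chars.isalnum c || PySem.Chars.isspace c)) cur acc
          = PySem.Chars.split₀.go
            (rest.filter (fun c => PySem.Chars.isalnum c || PySem.Chars.isspace c)) (c :: cur) acc
          by simp [PySem.Chars.split₀.go, hs]]
      rcases hinv with ⟨h1, h2, h3, h4⟩ | ⟨h1, h2, h3, h4⟩ | ⟨h1, h2, h3⟩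
      · subst h1 h2 h3 h4
        exact ih [c] [] [c] false (Or.inr (Or.inr (by simp [J_cons])))
      · subst h1 h2
        have hacc : acc ≠ [] := by
          intro h; rw [h] at h3; simp [J, PySem.Chars.join, List.intercalate] at h3
          exact h4 h3
        have hres : res ++ ' ' :: [c] = J ([c].reverse :: acc) := by
          rw [J_cons]; simp [hacc, h3]
        have hih := ih [c] acc (res ++ ' ' :: [c]) false
          (Or.inr (Or.inr ⟨by simp, rfl, hres⟩))
        simpa using hih
      · subst h2 h3
        refine ih (c :: cur) acc (J (cur.reverse :: acc) ++ [c]) false (Or.inr (Or.inr ?_))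
        refine ⟨by simp, rfl, ?_⟩
        rw [J_cons, J_cons]
        by_cases hacc : acc = [] <;> simp [hacc]
    · by_cases hsp : PySem.Chars.isspace c = true
      · -- space: machine sets the pending flag (if output nonempty), go closes the word
        have hfil : (c :: rest).filter (fun c => PySem.Chars.isalnum c || PySem.Chars.isspace c)
            = c :: rest.filter (fun c => PySem.Chars.isalnum c || PySem.Chars.isspace c) := by
          simp [hsp]
        rw [hfil]
        have ha' : PySem.Chars.isalnum c = false := by simpa using ha
        simp only [List.foldl_cons, normStep, ha', Bool.false_eq_true, if_false, hsp, if_true]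
        rcases hinv with ⟨h1, h2, h3, h4⟩ | ⟨h1, h2, h3, h4⟩ | ⟨h1, h2, h3⟩
        · subst h1 h2 h3 h4
          rw [show PySem.Chars.split₀.go
                (c :: rest.filter (fun c => PySem.Chars.isalnum c || PySem.Chars.isspace c)) [] []
              = PySem.Chars.split₀.go
                (rest.filter (fun c => PySem.Chars.isalnum c || PySem.Chars.isspace c)) [] []
              by simp [PySem.Chars.split₀.go, hsp]]
          simpa using ih [] [] [] false (Or.inl (by simp))
        · subst h1 h2
          rw [show PySem.Chars.split₀.go
                (c :: rest.filter (fun c => PySem.Chars.isalnum c || PySem.Chars.isspace c)) [] acc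
              = PySem.Chars.split₀.go
                (rest.filter (fun c => PySem.Chars.isalnum c || PySem.Chars.isspace c)) [] acc
              by simp [PySem.Chars.split₀.go, hsp]]
          have hne : res.isEmpty = false := by simpa [List.isEmpty_iff] using h4
          simp only [hne, Bool.not_false, if_true]
          exact ih [] acc res true (Or.inr (Or.inl ⟨rfl, rfl, h3, h4⟩))
        · subst h2 h3
          have hcur : cur.isEmpty = false := by simpa [List.isEmpty_iff] using h1
          rw [show PySem.Chars.split₀.go
                (c :: rest.filter (fun c => PySem.Chars.isalnum c || PySem.Chars.isspace c)) cur acc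
              = PySem.Chars.split₀.go
                (rest.filter (fun c => PySem.Chars.isalnum c || PySem.Chars.isspace c)) []
                (cur.reverse :: acc)
              by simp [PySem.Chars.split₀.go, hsp, hcur]]
          have h4 := J_word_ne_nil cur acc h1
          have hne : (J (cur.reverse :: acc)).isEmpty = false := by
            simpa [List.isEmpty_iff] using h4
          simp only [hne, Bool.not_false, if_true]
          exact ih [] (cur.reverse :: acc) (J (cur.reverse :: acc)) true
            (Or.inr (Or.inl ⟨rfl, rfl, rfl, h4⟩))
      · -- dropped char: identity step on both sides
        have ha' : PySem.Chars.isalnum c = false := by simpa using ha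
        have hs' : PySem.Chars.isspace c = false := by simpa using hsp
        have hfil : (c :: rest).filter (fun c => PySem.Chars.isalnum c || PySem.Chars.isspace c)
            = rest.filter (fun c => PySem.Chars.isalnum c || PySem.Chars.isspace c) := by
          simp [ha', hs']
        rw [hfil]
        simp only [List.foldl_cons, normStep, ha', Bool.false_eq_true, if_false, hs']
        exact ih cur acc res p hinv

-- ===== VERDICT (by name: the statement is the Claim_ definition above) =====
theorem norm_for_key_spec : Claim_equal_norm_for_key := by
  intro text _
  unfold Spec_norm_for_key norm_for_key norm_for_key_alt
  by_cases h : text = ""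
  · subst h
    simp [PySem.Chars.lower]
  · simp only [h, if_false]
    rw [PySem.List.foldl_append_if (fun ch => PySem.Chars.isalnum ch || PySem.Chars.isspace ch)
      (fun ch => ch) (PySem.Chars.lower text.toList) []]
    rw [machine_go (PySem.Chars.lower text.toList) [] [] [] false (Or.inl (by simp))]
    simp only [List.map_id', List.nil_append, PySem.Chars.split₀]
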